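-- pv_equiv track=rewrite | github.com/Jira88alt/pg | zkouska/zkouska1.py | process_numbers
-- ===== SOURCE A (Python) =====
-- def process_numbers(numbers):
--     vysledek = []
--     for num in numbers:
--         if num == 10:
--             break
--         if num > 5:
--             vysledek.append(num * 2)
--     return vysledek
--     pass
-- ===== SOURCE B (Python) =====
-- def process_numbers(numbers):
--     try:
--         end = numbers.index(10)
--     except ValueError:
--         end = len(numbers)
--     return [n * 2 for n in numbers[:end] if n > 5]
-- ===== Notes on version B (the rewrite author's own statement) =====
-- stated objective: alternative
-- what changed: Instead of a single loop that breaks on 10 and appends doubled values, B first locates the cut point with list.index(10) (falling back to the full length), slices the list there, and then builds the result with a filter/map comprehension over the slice.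
import Mathlib
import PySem

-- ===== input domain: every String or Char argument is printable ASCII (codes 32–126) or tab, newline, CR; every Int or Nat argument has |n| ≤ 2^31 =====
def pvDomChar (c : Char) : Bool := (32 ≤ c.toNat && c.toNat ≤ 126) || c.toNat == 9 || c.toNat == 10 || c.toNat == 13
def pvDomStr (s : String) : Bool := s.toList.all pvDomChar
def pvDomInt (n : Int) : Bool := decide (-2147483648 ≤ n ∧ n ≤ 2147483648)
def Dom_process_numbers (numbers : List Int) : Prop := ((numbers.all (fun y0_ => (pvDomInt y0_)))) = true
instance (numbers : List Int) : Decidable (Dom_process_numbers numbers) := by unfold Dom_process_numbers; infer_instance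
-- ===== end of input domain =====

-- B locates the cut point with list.index(10) up front, slices there, and maps a comprehension over the slice (alternative decomposition, same cost).

-- ===== PORT A =====
-- literal port of A's loop: accumulator, break on 10, append num*2 when num > 5
def process_numbers_loop (nums : List Int) (vysledek : List Int) : List Int :=
  match nums with
  | [] => vysledek
  | num :: rest =>
    if num == 10 then vysledek
    else if num > 5 then process_numbers_loop rest (vysledek ++ [num * 2])
    else process_numbers_loop rest vysledek

def process_numbers (numbers : List Int) : List Int :=
  process_numbers_loop numbers []

-- ===== PORT B =====
-- end = numbers.index(10) (ValueError -> len(numbers)); [n*2 for n in numbers[:end] if n > 5]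
def process_numbers_alt (numbers : List Int) : List Int :=
  let e : Nat := (PySem.List.index? numbers 10).getD numbers.length
  ((PySem.List.slice numbers none (some (e : Int))).filter (fun n => n > 5)).map (fun n => n * 2)

-- ===== PRECONDITION & SPEC =====
def Spec_process_numbers (numbers : List Int) (out : List Int) : Prop := out = process_numbers_alt numbers
instance (numbers : List Int) (out : List Int) : Decidable (Spec_process_numbers numbers out) := by unfold Spec_process_numbers; infer_instance

-- ===== CLAIM =====
def Claim_equal_process_numbers : Prop := ∀ (numbers : List Int), Dom_process_numbers numbers → Spec_process_numbers numbers (process_numbers numbers)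

-- ===== LEMMAS AND PROOFS =====
theorem take_index_eq_takeWhile (nums : List Int) :
    nums.take ((PySem.List.index? nums 10).getD nums.length)
      = nums.takeWhile (fun n => n ≠ 10) := by
  induction nums with
  | nil => simp
  | cons num rest ih =>
    by_cases h10 : num = 10
    · subst h10
      rw [PySem.List.index?_cons_self]
      simp [List.takeWhile]
    · rw [PySem.List.index?_cons_of_ne rest h10]
      cases h : PySem.List.index? rest 10 with
      | none =>
        rw [h] at ih
        simp only [Option.getD] at ih ⊢
        simp [List.takeWhile, h10]
        simpa using ih
      | some k =>
        rw [h] at ih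
        simp only [Option.getD] at ih ⊢
        simp [List.takeWhile, h10]
        simpa using ih

theorem process_numbers_loop_eq (nums acc : List Int) :
    process_numbers_loop nums acc
      = acc ++ ((nums.takeWhile (fun n => n ≠ 10)).filter (fun n => n > 5)).map (fun n => n * 2) := by
  induction nums generalizing acc with
  | nil => simp [process_numbers_loop]
  | cons num rest ih =>
    by_cases h10 : num = 10
    · simp [process_numbers_loop, h10, List.takeWhile]
    · by_cases h5 : num > 5
      · simp [process_numbers_loop, h10, h5, List.takeWhile, ih]
      · simp [process_numbers_loop, h10, h5, List.takeWhile, ih]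

-- ===== VERDICT =====
theorem process_numbers_spec : Claim_equal_process_numbers := by
  intro numbers _
  unfold Spec_process_numbers process_numbers process_numbers_alt
  simp only [PySem.List.slice_to_natCast, take_index_eq_takeWhile]
  simpa using process_numbers_loop_eq numbers []
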